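-- pv_equiv track=rewrite | github.com/JacobThwaites/ten-thousand | ten_thousand.py | valid_combinations
-- ===== SOURCE A (Python) =====
-- from collections import Counter
-- from itertools import combinations
--
-- def valid_combinations(roll):
--     def calculate_score(dice):
--         counts = Counter(dice)
--         score = 0
--         dice_used = 0
--
--         # Check for triples and higher multiples
--         for num in range(1, 7):
--             if counts[num] >= 3:
--                 dice_used += 3
--                 if num == 1:
--                     score += 1000 * (2 ** (counts[num] - 3))
--                 else:
--                     score += 100 * num * (2 ** (counts[num] - 3))
--                 counts[num] -= 3
--
--         # Add scores for remaining 1s and 5s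
--         dice_used += counts[1] + counts[5]
--         score += counts[1] * 100
--         score += counts[5] * 50
--
--         return score, dice_used
--
--     valid_combos = set()
--
--     # Generate all non-empty subsets of the roll
--     for num_dice in range(1, len(roll) + 1):
--         for subset in combinations(roll, num_dice):
--             score, dice_used = calculate_score(subset)
--             if score > 0:
--                 valid_combos.add((score, dice_used))
--
--     return sorted(valid_combos, key=lambda x: (x[1], x[0]))
-- ===== SOURCE B (Python) =====
-- from collections import Counter
--
-- def valid_combinations(roll):
--     counts = Counter(roll)
--
--     def face_score(face, c):
--         score, used = 0, 0
--         if c >= 3: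
--             score = (1000 if face == 1 else 100 * face) * (2 ** (c - 3))
--             used = 3
--             c -= 3
--         if face == 1:
--             score += 100 * c
--             used += c
--         elif face == 5:
--             score += 50 * c
--             used += c
--         return score, used
--
--     combos = set()
--
--     def collect(faces, score, used):
--         if not faces:
--             if score > 0:
--                 combos.add((score, used))
--             return
--         face, rest = faces[0], faces[1:]
--         for c in range(counts[face] + 1):
--             s, u = face_score(face, c)
--             collect(rest, score + s, used + u)
--
--     collect([1, 2, 3, 4, 5, 6], 0, 0)
--     return sorted(combos, key=lambda x: (x[1], x[0]))
-- ===== Notes on version B (the rewrite author's own statement) =====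
-- stated objective: faster
-- what changed: B walks per-face multiset count combinations (one choice of 0..count[face] dice for each of the six scoring faces) instead of scoring all 2^n positional subsets, exploiting that the (score, dice_used) pair of a subset depends only on its per-face counts.
import Mathlib
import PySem

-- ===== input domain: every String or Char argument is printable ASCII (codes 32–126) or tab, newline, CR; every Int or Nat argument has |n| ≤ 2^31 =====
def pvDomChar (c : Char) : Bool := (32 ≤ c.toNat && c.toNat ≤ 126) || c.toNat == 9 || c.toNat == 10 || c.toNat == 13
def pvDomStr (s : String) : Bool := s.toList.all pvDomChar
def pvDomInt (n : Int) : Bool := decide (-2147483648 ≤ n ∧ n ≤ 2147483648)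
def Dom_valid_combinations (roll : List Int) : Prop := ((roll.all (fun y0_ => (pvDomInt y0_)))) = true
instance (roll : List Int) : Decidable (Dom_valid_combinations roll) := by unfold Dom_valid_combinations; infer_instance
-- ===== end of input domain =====

-- B replaces A's enumeration of all 2^n positional subsets by a walk over per-face
-- multiset counts (at most ∏(count_i+1) leaves over the six scoring faces): faster (asymptotic).

-- ===== PORT A =====
-- helper: the body of A's 'for num in range(1, 7)' loop (state = (counts, score, dice_used))
def pvStep (st : PySem.Dict Int Int × Int × Int) (num : Int) : PySem.Dict Int Int × Int × Int :=
  if 3 ≤ st.1.getD num 0 then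
    let used := st.2.2 + 3
    let score := if num = 1 then st.2.1 + 1000 * 2 ^ (st.1.getD num 0 - 3).toNat
      else st.2.1 + 100 * num * 2 ^ (st.1.getD num 0 - 3).toNat
    (st.1.insert num (st.1.getD num 0 - 3), score, used)
  else st

-- helper: A's inner 'calculate_score' (returns (score, dice_used))
def pvCalcScore (dice : List Int) : Int × Int :=
  let counts := PySem.Dict.counter dice
  let st := (PySem.List.pyRange 1 7 1).foldl pvStep (counts, (0 : Int), (0 : Int))
  let used := st.2.2 + (st.1.getD 1 0 + st.1.getD 5 0)
  let score := st.2.1 + st.1.getD 1 0 * 100 + st.1.getD 5 0 * 50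
  (score, used)

def valid_combinations (roll : List Int) : List (Int × Int) :=
  let combos : PySem.Set (Int × Int) :=
    (PySem.List.pyRange 1 (PySem.List.len roll + 1) 1).foldl
      (fun acc numDice =>
        (PySem.List.combinations roll numDice.toNat).foldl
          (fun acc subset =>
            if 0 < (pvCalcScore subset).1 then PySem.Set.add acc (pvCalcScore subset) else acc) acc)
      PySem.Set.empty
  PySem.List.sorted2 combos (fun x => x.2) (fun x => x.1) false

-- ===== PORT B =====
-- helper: B's 'face_score(face, c)'
def pvFaceScore (face : Int) (c : Int) : Int × Int :=
  let t : Int × Int × Int :=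
    if 3 ≤ c then ((if face = 1 then 1000 else 100 * face) * 2 ^ (c - 3).toNat, 3, c - 3)
    else (0, 0, c)
  if face = 1 then (t.1 + 100 * t.2.2, t.2.1 + t.2.2)
  else if face = 5 then (t.1 + 50 * t.2.2, t.2.1 + t.2.2)
  else (t.1, t.2.1)

-- helper: B's recursive 'collect(faces, score, used)' (combos accumulator passed explicitly)
def pvCollect (counts : PySem.Dict Int Int) :
    List Int → Int → Int → PySem.Set (Int × Int) → PySem.Set (Int × Int)
  | [], score, used, acc => if 0 < score then PySem.Set.add acc (score, used) else acc
  | f :: rest, score, used, acc =>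
      (PySem.List.pyRange 0 (counts.getD f 0 + 1) 1).foldl
        (fun acc c =>
          let p := pvFaceScore f c
          pvCollect counts rest (score + p.1) (used + p.2) acc) acc

def valid_combinations_alt (roll : List Int) : List (Int × Int) :=
  let counts := PySem.Dict.counter roll
  let combos := pvCollect counts [1, 2, 3, 4, 5, 6] 0 0 PySem.Set.empty
  PySem.List.sorted2 combos (fun x => x.2) (fun x => x.1) false

-- ===== PRECONDITION & SPEC =====
def Spec_valid_combinations (roll : List Int) (out : List (Int × Int)) : Prop := out = valid_combinations_alt roll
instance (roll : List Int) (out : List (Int × Int)) : Decidable (Spec_valid_combinations roll out) := by unfold Spec_valid_combinations; infer_instance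

-- ===== CLAIM (what is proved, stated in full; the proofs are below) =====
def Claim_equal_valid_combinations : Prop := ∀ (roll : List Int), Dom_valid_combinations roll → Spec_valid_combinations roll (valid_combinations roll)

-- ===== LEMMAS AND PROOFS =====

-- closed-form pieces of the per-face score
def pvTrip (num c : Int) : Int := if 3 ≤ c then (if num = 1 then 1000 else 100 * num) * 2 ^ (c - 3).toNat else 0
def pvUsed3 (c : Int) : Int := if 3 ≤ c then 3 else 0
def pvRem (c : Int) : Int := if 3 ≤ c then c - 3 else c

lemma pvFaceScore_eq (face c : Int) :
    pvFaceScore face c =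
      (pvTrip face c + (if face = 1 then 100 * pvRem c else if face = 5 then 50 * pvRem c else 0),
       pvUsed3 c + (if face = 1 ∨ face = 5 then pvRem c else 0)) := by
  unfold pvFaceScore pvTrip pvUsed3 pvRem
  split_ifs <;> simp_all

-- the six-face total in the right-nested shape pvReach produces
def pvTotal (c1 c2 c3 c4 c5 c6 : Int) : Int × Int :=
  ((pvFaceScore 1 c1).1 + ((pvFaceScore 2 c2).1 + ((pvFaceScore 3 c3).1 + ((pvFaceScore 4 c4).1 +
      ((pvFaceScore 5 c5).1 + ((pvFaceScore 6 c6).1 + 0))))),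
   (pvFaceScore 1 c1).2 + ((pvFaceScore 2 c2).2 + ((pvFaceScore 3 c3).2 + ((pvFaceScore 4 c4).2 +
      ((pvFaceScore 5 c5).2 + ((pvFaceScore 6 c6).2 + 0))))))

-- generic: membership in a fold that only adds
lemma pv_mem_foldl {β : Type} (l : List β) (g : PySem.Set (Int × Int) → β → PySem.Set (Int × Int))
    (p : Int × Int) (Q : β → Prop)
    (h : ∀ a x, x ∈ l → (p ∈ g a x ↔ p ∈ a ∨ Q x)) :
    ∀ a, p ∈ l.foldl g a ↔ p ∈ a ∨ ∃ x ∈ l, Q x := by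
  induction l with
  | nil => simp
  | cons x xs ih =>
      intro a
      rw [List.foldl_cons, ih (fun a y hy => h a y (by simp [hy]))]
      rw [h a x (by simp)]
      simp only [List.mem_cons]
      constructor
      · rintro ((hp | hq) | ⟨y, hy, hQ⟩)
        · exact Or.inl hp
        · exact Or.inr ⟨x, Or.inl rfl, hq⟩
        · exact Or.inr ⟨y, Or.inr hy, hQ⟩
      · rintro (hp | ⟨y, (rfl | hy), hQ⟩)
        · exact Or.inl (Or.inl hp)
        · exact Or.inl (Or.inr hQ)
        · exact Or.inr ⟨y, hy, hQ⟩

-- generic: a fold that preserves Nodup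
lemma pv_nodup_foldl {β : Type} (l : List β) (g : PySem.Set (Int × Int) → β → PySem.Set (Int × Int))
    (h : ∀ a x, a.Nodup → (g a x).Nodup) :
    ∀ a, a.Nodup → (l.foldl g a).Nodup := by
  induction l with
  | nil => exact fun a ha => ha
  | cons x xs ih => intro a ha; exact ih _ (h a x ha)

-- the pairs reachable by choosing, for each face of `faces`, between 0 and counts[face] dice
def pvReach (counts : PySem.Dict Int Int) : List Int → (Int × Int) → Prop
  | [], q => q = (0, 0)
  | f :: rest, q => ∃ c : Int, (0 ≤ c ∧ c ≤ counts.getD f 0) ∧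
      ∃ r, pvReach counts rest r ∧ q = ((pvFaceScore f c).1 + r.1, (pvFaceScore f c).2 + r.2)

lemma pv_mem_collect (counts : PySem.Dict Int Int) :
    ∀ (faces : List Int) (score used : Int) (acc : PySem.Set (Int × Int)) (p : Int × Int),
      p ∈ pvCollect counts faces score used acc ↔
        p ∈ acc ∨ ∃ q, pvReach counts faces q ∧ 0 < score + q.1 ∧ p = (score + q.1, used + q.2) := by
  intro faces
  induction faces with
  | nil =>
      intro score used acc p
      simp only [pvCollect, pvReach]
      split_ifs with hs
      · rw [PySem.Set.mem_add]
        constructor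
        · rintro (hp | rfl)
          · exact Or.inl hp
          · exact Or.inr ⟨(0, 0), rfl, by simpa using hs, by simp⟩
        · rintro (hp | ⟨q, rfl, _, rfl⟩)
          · exact Or.inl hp
          · simp
      · constructor
        · exact Or.inl
        · rintro (hp | ⟨q, rfl, h0, rfl⟩)
          · exact hp
          · simp at h0; omega
  | cons f rest ih =>
      intro score used acc p
      simp only [pvCollect]
      rw [pv_mem_foldl _ _ p
        (fun c => ∃ q, pvReach counts rest q ∧ 0 < score + (pvFaceScore f c).1 + q.1 ∧
          p = (score + (pvFaceScore f c).1 + q.1, used + (pvFaceScore f c).2 + q.2))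
        (fun a c _ => by rw [ih]) acc]
      simp only [pvReach, PySem.List.mem_pyRange_one]
      constructor
      · rintro (hp | ⟨c, ⟨hc0, hc1⟩, q, hq, h0, rfl⟩)
        · exact Or.inl hp
        · refine Or.inr ⟨((pvFaceScore f c).1 + q.1, (pvFaceScore f c).2 + q.2),
            ⟨c, ⟨hc0, by omega⟩, q, hq, rfl⟩, by dsimp only; omega, by dsimp only; ring_nf⟩
      · rintro (hp | ⟨_, ⟨c, ⟨hc0, hc1⟩, q, hq, rfl⟩, h0, rfl⟩)
        · exact Or.inl hp
        · refine Or.inr ⟨c, ⟨hc0, by omega⟩, q, hq, by dsimp only at h0 ⊢; omega, by dsimp only; ring_nf⟩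

lemma pv_reach_iff (counts : PySem.Dict Int Int) (q : Int × Int) :
    pvReach counts [1, 2, 3, 4, 5, 6] q ↔
      ∃ c1 c2 c3 c4 c5 c6 : Int,
        (0 ≤ c1 ∧ c1 ≤ counts.getD 1 0) ∧ (0 ≤ c2 ∧ c2 ≤ counts.getD 2 0) ∧
        (0 ≤ c3 ∧ c3 ≤ counts.getD 3 0) ∧ (0 ≤ c4 ∧ c4 ≤ counts.getD 4 0) ∧
        (0 ≤ c5 ∧ c5 ≤ counts.getD 5 0) ∧ (0 ≤ c6 ∧ c6 ≤ counts.getD 6 0) ∧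
        q = pvTotal c1 c2 c3 c4 c5 c6 := by
  simp only [pvReach, pvTotal]
  constructor
  · rintro ⟨c1, h1, r1, ⟨c2, h2, r2, ⟨c3, h3, r3, ⟨c4, h4, r4, ⟨c5, h5, r5, ⟨c6, h6, r6, rfl, rfl⟩, rfl⟩, rfl⟩, rfl⟩, rfl⟩, rfl⟩
    exact ⟨c1, c2, c3, c4, c5, c6, h1, h2, h3, h4, h5, h6, rfl⟩
  · rintro ⟨c1, c2, c3, c4, c5, c6, h1, h2, h3, h4, h5, h6, rfl⟩
    exact ⟨c1, h1, _, ⟨c2, h2, _, ⟨c3, h3, _, ⟨c4, h4, _, ⟨c5, h5, _, ⟨c6, h6, (0, 0), rfl, rfl⟩, rfl⟩, rfl⟩, rfl⟩, rfl⟩, rfl⟩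

-- A's range(1,7) loop, characterised for any Nodup list of faces
lemma pv_loop (nums : List Int) (hn : nums.Nodup) :
    ∀ (d : PySem.Dict Int Int) (score used : Int),
      (∀ k, (nums.foldl pvStep (d, score, used)).1.getD k 0 =
          if k ∈ nums then pvRem (d.getD k 0) else d.getD k 0) ∧
      (nums.foldl pvStep (d, score, used)).2.1 = score + (nums.map (fun n => pvTrip n (d.getD n 0))).sum ∧
      (nums.foldl pvStep (d, score, used)).2.2 = used + (nums.map (fun n => pvUsed3 (d.getD n 0))).sum := by
  induction nums with
  | nil => intro d score used; simp
  | cons f rest ih =>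
      intro d score used
      have hf : f ∉ rest := (List.nodup_cons.mp hn).1
      have hrest : rest.Nodup := (List.nodup_cons.mp hn).2
      rw [List.foldl_cons]
      by_cases h3 : 3 ≤ d.getD f 0
      · have hstep : pvStep (d, score, used) f =
            (d.insert f (d.getD f 0 - 3),
             (if f = 1 then score + 1000 * 2 ^ (d.getD f 0 - 3).toNat
              else score + 100 * f * 2 ^ (d.getD f 0 - 3).toNat),
             used + 3) := by
          simp [pvStep, h3]
        rw [hstep]
        obtain ⟨hd, hs, hu⟩ := ih hrest (d.insert f (d.getD f 0 - 3)) _ (used + 3)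
        have hget : ∀ k, (d.insert f (d.getD f 0 - 3)).getD k 0 =
            if k = f then d.getD f 0 - 3 else d.getD k 0 := fun k => PySem.Dict.getD_insert ..
        have hmap : ∀ (g : Int → Int → Int),
            (rest.map (fun n => g n ((d.insert f (d.getD f 0 - 3)).getD n 0))).sum =
            (rest.map (fun n => g n (d.getD n 0))).sum := by
          intro g
          congr 1
          refine List.map_congr_left (fun n hnmem => ?_)
          rw [hget n, if_neg (fun hEq => hf (by rw [hEq] at hnmem; exact hnmem))]
        refine ⟨fun k => ?_, ?_, ?_⟩
        · rw [hd k, hget k]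
          by_cases hk : k ∈ rest
          · have : k ≠ f := fun hEq => hf (hEq ▸ hk)
            simp [hk, this]
          · by_cases hkf : k = f
            · subst hkf; simp [hk, pvRem, h3]
            · simp [hk, hkf]
        · rw [hs, hmap (fun n c => pvTrip n c)]
          simp only [List.map_cons, List.sum_cons, pvTrip, if_pos h3]
          split_ifs <;> ring
        · rw [hu, hmap (fun _ c => pvUsed3 c)]
          simp only [List.map_cons, List.sum_cons, pvUsed3, if_pos h3]
          ring
      · have hstep : pvStep (d, score, used) f = (d, score, used) := by simp [pvStep, h3]
        rw [hstep]
        obtain ⟨hd, hs, hu⟩ := ih hrest d score used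
        refine ⟨fun k => ?_, ?_, ?_⟩
        · rw [hd k]
          by_cases hk : k ∈ rest
          · have : k ≠ f := fun hEq => hf (hEq ▸ hk)
            simp [hk, this]
          · by_cases hkf : k = f
            · subst hkf; simp [hk, pvRem, h3]
            · simp [hk, hkf]
        · rw [hs]; simp only [List.map_cons, List.sum_cons, pvTrip, if_neg h3]; ring
        · rw [hu]; simp only [List.map_cons, List.sum_cons, pvUsed3, if_neg h3]; ring

-- A's calculate_score as a function of the six face counts
lemma pv_calc_eq (dice : List Int) :
    pvCalcScore dice = pvTotal (dice.count 1) (dice.count 2) (dice.count 3)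
      (dice.count 4) (dice.count 5) (dice.count 6) := by
  have h17 : PySem.List.pyRange 1 7 1 = [1, 2, 3, 4, 5, 6] := by decide
  have hnd : ([1, 2, 3, 4, 5, 6] : List Int).Nodup := by decide
  obtain ⟨hd, hs, hu⟩ := pv_loop [1, 2, 3, 4, 5, 6] hnd (PySem.Dict.counter dice) 0 0
  unfold pvCalcScore
  simp only [h17, hs, hu, hd 1, hd 5]
  simp only [PySem.Dict.getD_counter, List.map_cons, List.map_nil, List.sum_cons, List.sum_nil,
    pvTotal, pvFaceScore_eq]
  norm_num [List.mem_cons]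
  constructor <;> ring

-- every prescribed bundle of face counts is realised by some sublist of roll
lemma pv_exists_sublist (roll : List Int) :
    ∀ (c : Int → Nat), (∀ x, c x ≤ roll.count x) → ∃ s : List Int, s.Sublist roll ∧ ∀ x, s.count x = c x := by
  induction roll with
  | nil =>
      intro c h
      exact ⟨[], List.Sublist.refl _, fun x => by have := h x; simp at this ⊢; omega⟩
  | cons a t ih =>
      intro c h
      by_cases ha : c a = 0
      · obtain ⟨s, hsub, hcnt⟩ := ih c (fun x => by
          have := h x
          rcases eq_or_ne x a with rfl | hx
          · omega
          · rwa [List.count_cons_of_ne hx.symm] at this)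
        exact ⟨s, hsub.cons a, hcnt⟩
      · obtain ⟨s, hsub, hcnt⟩ := ih (fun x => if x = a then c a - 1 else c x) (fun x => by
          have := h x
          rcases eq_or_ne x a with rfl | hx
          · rw [List.count_cons_self] at this; simp; omega
          · rw [List.count_cons_of_ne hx.symm] at this; simpa [hx])
        refine ⟨a :: s, hsub.cons₂ a, fun x => ?_⟩
        have := hcnt x
        rcases eq_or_ne x a with rfl | hx
        · rw [List.count_cons_self]; simp at this; omega
        · rw [List.count_cons_of_ne hx.symm]; simpa [hx] using this

lemma pv_calc_nil : pvCalcScore [] = (0, 0) := by decide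

-- membership in A's accumulated set
lemma pv_memA (roll : List Int) (p : Int × Int) :
    p ∈ (PySem.List.pyRange 1 (PySem.List.len roll + 1) 1).foldl
        (fun acc numDice =>
          (PySem.List.combinations roll numDice.toNat).foldl
            (fun acc subset =>
              if 0 < (pvCalcScore subset).1 then PySem.Set.add acc (pvCalcScore subset) else acc) acc)
        PySem.Set.empty ↔
      ∃ s, s.Sublist roll ∧ 0 < (pvCalcScore s).1 ∧ p = pvCalcScore s := by
  rw [pv_mem_foldl _ _ p
    (fun numDice => ∃ subset ∈ PySem.List.combinations roll numDice.toNat,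
      0 < (pvCalcScore subset).1 ∧ p = pvCalcScore subset)
    (fun a k _ => by
      rw [pv_mem_foldl _ _ p (fun subset => 0 < (pvCalcScore subset).1 ∧ p = pvCalcScore subset)
        (fun a s _ => by
          dsimp only
          split_ifs with h0
          · rw [PySem.Set.mem_add]
            constructor
            · rintro (hp | rfl)
              · exact Or.inl hp
              · exact Or.inr ⟨h0, rfl⟩
            · rintro (hp | ⟨_, rfl⟩)
              · exact Or.inl hp
              · exact Or.inr rfl
          · constructor
            · exact Or.inl
            · rintro (hp | ⟨h1, rfl⟩)
              · exact hp
              · exact absurd h1 h0) a]) PySem.Set.empty]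
  simp only [PySem.Set.empty, List.not_mem_nil, false_or]
  constructor
  · rintro ⟨k, _, subset, hmem, h0, rfl⟩
    exact ⟨subset, PySem.List.sublist_of_mem_combinations hmem, h0, rfl⟩
  · rintro ⟨s, hsub, h0, rfl⟩
    have hne : s ≠ [] := by
      rintro rfl
      rw [pv_calc_nil] at h0
      exact absurd h0 (by norm_num)
    have hlen : 1 ≤ s.length := List.length_pos_of_ne_nil hne
    refine ⟨(s.length : Int), ?_, s, ?_, h0, rfl⟩
    · rw [PySem.List.mem_pyRange_one]
      have := hsub.length_le
      simp only [PySem.List.len_eq]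
      omega
    · rw [Int.toNat_natCast, PySem.List.mem_combinations_iff]
      exact ⟨hsub, rfl⟩

-- both accumulated sets are Nodup
lemma pv_nodup_collect (counts : PySem.Dict Int Int) :
    ∀ (faces : List Int) (score used : Int) (acc : PySem.Set (Int × Int)),
      acc.Nodup → (pvCollect counts faces score used acc).Nodup := by
  intro faces
  induction faces with
  | nil =>
      intro score used acc ha
      simp only [pvCollect]
      split_ifs
      · exact PySem.Set.nodup_add _ _ ha
      · exact ha
  | cons f rest ih =>
      intro score used acc ha
      simp only [pvCollect]
      exact pv_nodup_foldl _ _ (fun a c hna => ih _ _ a hna) acc ha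

-- sorted2 with key (x.2, x.1) is sorted with the lexicographic key
lemma pv_sorted2_eq_sorted (xs : List (Int × Int)) :
    PySem.List.sorted2 xs (fun x => x.2) (fun x => x.1) false =
      PySem.List.sorted xs (fun x => toLex (x.2, x.1)) false := by
  have hbef : ∀ a b : Int × Int,
      (decide (a.2 < b.2) || (!decide (b.2 < a.2) && decide (a.1 < b.1)))
        = decide ((toLex (a.2, a.1) : Lex (Int × Int)) < toLex (b.2, b.1)) := by
    intro a b
    have hlt : ((toLex (a.2, a.1) : Lex (Int × Int)) < toLex (b.2, b.1)) ↔
        (a.2 < b.2 ∨ ¬ b.2 < a.2 ∧ a.1 < b.1) := by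
      rw [Prod.Lex.toLex_lt_toLex]
      constructor
      · rintro (h | ⟨h1, h2⟩)
        · exact Or.inl h
        · exact Or.inr ⟨by omega, h2⟩
      · rintro (h | ⟨h1, h2⟩)
        · exact Or.inl h
        · rcases lt_or_eq_of_le (le_of_not_gt h1) with h | h
          · exact Or.inl h
          · exact Or.inr ⟨h, h2⟩
    rcases Decidable.em (a.2 < b.2) with h1 | h1 <;>
      rcases Decidable.em (b.2 < a.2) with h2 | h2 <;>
      rcases Decidable.em (a.1 < b.1) with h3 | h3 <;>
      simp [h1, h2, h3, hlt]
  rw [PySem.List.sorted_eq_foldl_insertBy]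
  simp only [PySem.List.sorted2, Bool.false_eq_true, if_false]
  congr 1
  funext acc x
  congr 1
  funext a b
  exact hbef a b

lemma pv_key_inj : Function.Injective (fun x : Int × Int => (toLex (x.2, x.1) : Lex (Int × Int))) := by
  intro a b h
  have := toLex.injective h
  exact Prod.ext (congrArg Prod.snd this) (congrArg Prod.fst this)

lemma pv_sorted2_congr (xs ys : List (Int × Int)) (h : xs.Perm ys) :
    PySem.List.sorted2 xs (fun x => x.2) (fun x => x.1) false =
      PySem.List.sorted2 ys (fun x => x.2) (fun x => x.1) false := by
  rw [pv_sorted2_eq_sorted, pv_sorted2_eq_sorted]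
  exact PySem.List.sorted_eq_sorted_of_perm xs ys _ pv_key_inj h

-- ===== VERDICT (by name: the statement is the Claim_ definition above) =====
theorem valid_combinations_spec : Claim_equal_valid_combinations := by
  intro roll _
  unfold Spec_valid_combinations valid_combinations valid_combinations_alt
  apply pv_sorted2_congr
  have hA : (((PySem.List.pyRange 1 (PySem.List.len roll + 1) 1).foldl
      (fun acc numDice =>
        (PySem.List.combinations roll numDice.toNat).foldl
          (fun acc subset =>
            if 0 < (pvCalcScore subset).1 then PySem.Set.add acc (pvCalcScore subset) else acc) acc)
      PySem.Set.empty) : List (Int × Int)).Nodup := by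
    refine pv_nodup_foldl _ _ (fun a k ha => ?_) _ (by simp [PySem.Set.empty])
    refine pv_nodup_foldl _ _ (fun a s ha => ?_) _ ha
    dsimp only
    split_ifs with h0
    · exact PySem.Set.nodup_add _ _ ha
    · exact ha
  have hB := pv_nodup_collect (PySem.Dict.counter roll) [1, 2, 3, 4, 5, 6] 0 0 PySem.Set.empty
    (by simp [PySem.Set.empty])
  rw [List.perm_ext_iff_of_nodup hA hB]
  intro p
  rw [pv_memA roll p, pv_mem_collect]
  simp only [PySem.Set.empty, List.not_mem_nil, false_or, zero_add, Prod.mk.eta]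
  constructor
  · rintro ⟨s, hsub, h0, rfl⟩
    refine ⟨pvCalcScore s, (pv_reach_iff _ _).mpr
      ⟨(s.count 1 : Int), (s.count 2 : Int), (s.count 3 : Int),
       (s.count 4 : Int), (s.count 5 : Int), (s.count 6 : Int),
       ?_, ?_, ?_, ?_, ?_, ?_, pv_calc_eq s⟩, h0, rfl⟩ <;>
      refine ⟨by positivity, ?_⟩ <;>
      rw [PySem.Dict.getD_counter] <;>
      exact_mod_cast hsub.count_le _
  · rintro ⟨q, hq, h0, rfl⟩
    obtain ⟨c1, c2, c3, c4, c5, c6, b1, b2, b3, b4, b5, b6, rfl⟩ := (pv_reach_iff _ _).mp hq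
    obtain ⟨s, hsub, hcnt⟩ := pv_exists_sublist roll
      (fun x => if x = 1 then c1.toNat else if x = 2 then c2.toNat else if x = 3 then c3.toNat
        else if x = 4 then c4.toNat else if x = 5 then c5.toNat else if x = 6 then c6.toNat else 0)
      (by
        intro x
        have g1 := b1.2; have g2 := b2.2; have g3 := b3.2
        have g4 := b4.2; have g5 := b5.2; have g6 := b6.2
        rw [PySem.Dict.getD_counter] at g1 g2 g3 g4 g5 g6
        dsimp only
        split_ifs with h1 h2 h3 h4 h5 h6 <;> subst_vars <;> omega)
    have hcalc : pvCalcScore s = pvTotal c1 c2 c3 c4 c5 c6 := by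
      rw [pv_calc_eq, hcnt 1, hcnt 2, hcnt 3, hcnt 4, hcnt 5, hcnt 6]
      norm_num [Int.toNat_of_nonneg b1.1, Int.toNat_of_nonneg b2.1, Int.toNat_of_nonneg b3.1,
        Int.toNat_of_nonneg b4.1, Int.toNat_of_nonneg b5.1, Int.toNat_of_nonneg b6.1]
    exact ⟨s, hsub, by rw [hcalc]; exact h0, by rw [hcalc]⟩
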